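-- pv_equiv track=rewrite | github.com/mod96/hiddenlayer | CodingTestExamples/Basic_Algorithms/Heap/Heap 1.py | solution
-- ===== SOURCE A (Python) =====
-- import heapq
--
-- def solution(scov, K):
--     heapq.heapify(scov)
--     answer=0
--     while scov[0]<K:
--         first=heapq.heappop(scov)
--         try:
--             second=heapq.heappop(scov)
--         except:
--             return -1
--         heapq.heappush(scov,first+2*second)
--         answer+=1
--
--     return answer
-- ===== SOURCE B (Python) =====
-- # B: simulate the mixing on an explicitly sorted list (sort once, pop the two
-- # smallest from the front, re-insert the mix by ordered insertion) instead of a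
-- # binary heap. Return-value equivalence only: A heapifies/mutates scov in place,
-- # B leaves it untouched.
-- def solution(scov, K):
--     arr = sorted(scov)
--     count = 0
--     while arr and arr[0] < K:
--         if len(arr) == 1:
--             return -1
--         first = arr.pop(0)
--         second = arr.pop(0)
--         x = first + 2 * second
--         k = 0
--         while k < len(arr) and arr[k] <= x:
--             k += 1
--         arr.insert(k, x)
--         count += 1
--     return count
-- ===== Notes on version B (the rewrite author's own statement) =====
-- stated objective: alternative
-- what changed: B replaces the binary heap by an explicitly maintained sorted list: sort once, then each round pops the two smallest from the front and re-inserts the mix by ordered insertion (return value only; A mutates scov via heapify, B does not).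
import Mathlib
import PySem

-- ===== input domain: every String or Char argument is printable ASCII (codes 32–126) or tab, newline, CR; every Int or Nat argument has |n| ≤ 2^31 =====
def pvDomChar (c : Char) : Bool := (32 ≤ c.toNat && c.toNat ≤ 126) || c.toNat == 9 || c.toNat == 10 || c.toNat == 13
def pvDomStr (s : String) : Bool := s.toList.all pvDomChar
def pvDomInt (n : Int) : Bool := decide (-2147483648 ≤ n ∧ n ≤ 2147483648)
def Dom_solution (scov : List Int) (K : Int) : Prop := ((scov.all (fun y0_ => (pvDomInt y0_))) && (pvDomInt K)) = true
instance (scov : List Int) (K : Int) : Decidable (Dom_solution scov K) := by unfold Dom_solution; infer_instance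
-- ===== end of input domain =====

-- B replaces A's binary heap by an explicitly maintained sorted list (sort once,
-- pop two heads, ordered re-insertion); return-value equivalence only — A mutates
-- scov in place via heapify, B leaves it untouched.


-- ===== PORT A =====
-- heapq is a library: heappop is ported by its value semantics (return the
-- minimum, remove one occurrence of it); the heap's internal layout is never
-- observable in the returned Int.
def loopA (K : Int) (heap : List Int) (answer : Int) : Int :=
  match h : heap.min? with
  | none => 0          -- corresponds to A's IndexError at scov[0]; unreachable under Pre_
  | some m =>
    if m < K then
      let rest := heap.erase m
      match h2 : rest.min? with
      | none => -1
      | some m2 => loopA K ((rest.erase m2) ++ [m + 2 * m2]) (answer + 1)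
    else answer
termination_by heap.length
decreasing_by
  have hm : m ∈ heap := List.min?_mem h
  have hm2 : m2 ∈ heap.erase m := List.min?_mem h2
  have l1 : (heap.erase m).length = heap.length - 1 := List.length_erase_of_mem hm
  have l2 : ((heap.erase m).erase m2).length = (heap.erase m).length - 1 := List.length_erase_of_mem hm2
  have hpos : 0 < heap.length := List.length_pos_of_mem hm
  have hpos2 : 0 < (heap.erase m).length := List.length_pos_of_mem hm2
  simp only [List.length_append, List.length_cons, List.length_nil, l1, l2]
  omega

def solution (scov : List Int) (K : Int) : Int := loopA K scov 0

-- ===== PORT B =====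
-- ordered insertion of x after all elements ≤ x (Source B's scan-and-insert loop)
def insortB : List Int → Int → List Int
  | [], x => [x]
  | y :: t, x => if y ≤ x then y :: insortB t x else x :: y :: t

theorem length_insortB (t : List Int) (x : Int) : (insortB t x).length = t.length + 1 := by
  induction t with
  | nil => simp [insortB]
  | cons y t ih => simp only [insortB]; split <;> simp [ih]

def loopB (K : Int) (arr : List Int) (count : Int) : Int :=
  match arr with
  | [] => count
  | a :: t =>
    if a < K then
      match t with
      | [] => -1
      | b :: t2 => loopB K (insortB t2 (a + 2 * b)) (count + 1)
    else count
termination_by arr.length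
decreasing_by simp [length_insortB]

def solution_alt (scov : List Int) (K : Int) : Int :=
  loopB K (PySem.List.sorted scov (fun x => x) false) 0

-- ===== PRECONDITION & SPEC =====
-- Pre_ excludes only the empty list, on which A raises IndexError at scov[0].
def Pre_solution (scov : List Int) (K : Int) : Prop := scov ≠ []
instance (scov : List Int) (K : Int) : Decidable (Pre_solution scov K) := by unfold Pre_solution; infer_instance
def pvWitness_solution : List Int × Int := ([1, 2, 3], 7)

def Spec_solution (scov : List Int) (K : Int) (out : Int) : Prop := out = solution_alt scov K
instance (scov : List Int) (K : Int) (out : Int) : Decidable (Spec_solution scov K out) := by unfold Spec_solution; infer_instance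

-- ===== CLAIM (what is proved, stated in full; the proofs are below) =====
def Claim_equal_solution : Prop := ∀ (scov : List Int) (K : Int), Dom_solution scov K → Pre_solution scov K → Spec_solution scov K (solution scov K)

-- ===== LEMMAS AND PROOFS =====

theorem min?_of_sorted_cons (a : Int) (t : List Int) (hs : (a :: t).Pairwise (· ≤ ·)) :
    (a :: t).min? = some a := by
  refine List.min?_eq_some_iff.mpr ⟨List.mem_cons_self, ?_⟩
  intro b hb
  rcases List.mem_cons.mp hb with rfl | h
  · exact le_refl b
  · exact (List.pairwise_cons.mp hs).1 b h

theorem perm_min? (l l' : List Int) (h : l.Perm l') : l.min? = l'.min? := by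
  cases hl : l'.min? with
  | none =>
    have : l' = [] := List.min?_eq_none_iff.mp hl
    subst this
    rw [h.eq_nil]
    exact hl
  | some a =>
    obtain ⟨ha, hall⟩ := List.min?_eq_some_iff.mp hl
    exact List.min?_eq_some_iff.mpr ⟨h.mem_iff.mpr ha, fun b hb => hall b (h.mem_iff.mp hb)⟩

theorem insortB_perm (t : List Int) (x : Int) : (insortB t x).Perm (x :: t) := by
  induction t with
  | nil => simp [insortB]
  | cons y t ih =>
    simp only [insortB]
    split
    · exact ((ih.cons y).trans (List.Perm.swap x y t))
    · exact List.Perm.refl _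

theorem insortB_sorted (t : List Int) (x : Int) (hs : t.Pairwise (· ≤ ·)) :
    (insortB t x).Pairwise (· ≤ ·) := by
  induction t with
  | nil => simp [insortB]
  | cons y t ih =>
    rcases List.pairwise_cons.mp hs with ⟨hy, ht⟩
    simp only [insortB]
    split
    · rename_i hyx
      refine List.pairwise_cons.mpr ⟨?_, ih ht⟩
      intro z hz
      have hz' : z ∈ x :: t := (insortB_perm t x).mem_iff.mp hz
      rcases List.mem_cons.mp hz' with rfl | h1
      · exact hyx
      · exact hy z h1
    · rename_i hyx
      have hxy : x ≤ y := by omega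
      refine List.pairwise_cons.mpr ⟨?_, hs⟩
      intro z hz
      rcases List.mem_cons.mp hz with rfl | h1
      · exact hxy
      · exact hxy.trans (hy z h1)

theorem loopB_cons (K a : Int) (t : List Int) (count : Int) :
    loopB K (a :: t) count =
      if a < K then
        (match t with
         | [] => -1
         | b :: t2 => loopB K (insortB t2 (a + 2 * b)) (count + 1))
      else count := by
  rw [loopB.eq_def]

theorem loop_eq (K : Int) : ∀ (n : Nat) (heap arr : List Int), heap.length ≤ n →
    heap.Perm arr → arr.Pairwise (· ≤ ·) → heap ≠ [] →
    ∀ ans, loopA K heap ans = loopB K arr ans := by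
  intro n
  induction n with
  | zero =>
    intro heap arr hlen _ _ hne _
    cases heap with
    | nil => exact absurd rfl hne
    | cons x xs => simp at hlen
  | succ n ih =>
    intro heap arr hlen hperm hsorted hne ans
    obtain ⟨a, t, rfl⟩ : ∃ a t, arr = a :: t := by
      cases arr with
      | nil => exact absurd hperm.eq_nil hne
      | cons a t => exact ⟨a, t, rfl⟩
    have ha : a ∈ heap := hperm.mem_iff.mpr List.mem_cons_self
    have hmin : heap.min? = some a := by
      rw [perm_min? _ _ hperm]; exact min?_of_sorted_cons a t hsorted
    have hrest : (heap.erase a).Perm t := by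
      have := hperm.erase a
      simpa using this
    rw [loopA.eq_def, loopB_cons]
    split
    · rename_i hnone; rw [hmin] at hnone; cases hnone
    · rename_i m hsome
      rw [hmin] at hsome
      injection hsome with hma
      subst hma
      by_cases hK : a < K
      · simp only [if_pos hK]
        cases t with
        | nil =>
          have hre : heap.erase a = [] := hrest.eq_nil
          split
          · rfl
          · rename_i m2 hsome2
            rw [hre] at hsome2
            cases hsome2
        | cons b t2 =>
          have ht : (b :: t2).Pairwise (· ≤ ·) := (List.pairwise_cons.mp hsorted).2
          have hmin2 : (heap.erase a).min? = some b := by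
            rw [perm_min? _ _ hrest]; exact min?_of_sorted_cons b t2 ht
          split
          · rename_i hnone2; rw [hmin2] at hnone2; cases hnone2
          · rename_i m2 hsome2
            rw [hmin2] at hsome2
            injection hsome2 with hmb
            subst hmb
            have hb : b ∈ heap.erase a := hrest.mem_iff.mpr List.mem_cons_self
            have hrest2 : ((heap.erase a).erase b).Perm t2 := by
              have := hrest.erase b
              simpa using this
            have hperm' : ((heap.erase a).erase b ++ [a + 2 * b]).Perm (insortB t2 (a + 2 * b)) := by
              refine List.Perm.trans (hrest2.append_right [a + 2 * b]) ?_
              exact (List.perm_append_singleton _ _).trans (insortB_perm t2 (a + 2 * b)).symm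
            have hsorted' : (insortB t2 (a + 2 * b)).Pairwise (· ≤ ·) :=
              insortB_sorted t2 _ (List.pairwise_cons.mp ht).2
            have hlen' : ((heap.erase a).erase b ++ [a + 2 * b]).length ≤ n := by
              have l1 : (heap.erase a).length = heap.length - 1 := List.length_erase_of_mem ha
              have l2 : ((heap.erase a).erase b).length = (heap.erase a).length - 1 :=
                List.length_erase_of_mem hb
              have p1 : 0 < heap.length := List.length_pos_of_mem ha
              have p2 : 0 < (heap.erase a).length := List.length_pos_of_mem hb
              simp only [List.length_append, List.length_cons, List.length_nil, l1, l2]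
              omega
            exact ih _ _ hlen' hperm' hsorted' (by simp) (ans + 1)
      · simp only [if_neg hK]

-- ===== VERDICT (by name: the statement is the Claim_ definition above) =====
theorem solution_spec : Claim_equal_solution := by
  intro scov K _ hpre
  unfold Spec_solution solution solution_alt
  have hperm : scov.Perm (PySem.List.sorted scov (fun x => x) false) :=
    (PySem.List.sorted_perm scov (fun x => x) false).symm
  have hsorted : (PySem.List.sorted scov (fun x => x) false).Pairwise (· ≤ ·) :=
    PySem.List.sorted_pairwise scov (fun x => x)
  exact loop_eq K scov.length scov _ le_rfl hperm hsorted hpre 0
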